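-- pv_equiv track=rewrite | github.com/JaikenWong/M-Agent | src/magent_tui/settings_loader.py | _resolve_claude_picker_model
-- ===== SOURCE A (Python) =====
-- from typing import Any, Optional, TYPE_CHECKING
--
-- def _resolve_claude_picker_model(raw: str, env: dict[str, Any], merged: dict[str, Any]) -> str:
--     """把 Claude Code 里可能出现的别名（sonnet 等）解析成发给 API 的 model 字符串。"""
--     m = (raw or "").strip()
--     if not m:
--         return "claude-sonnet-4-5"
--     key = m.lower()
--     # env 中 ANTHROPIC_DEFAULT_* 可覆盖 /model 的 sonnet|opus|haiku
--     alias_to_env: dict[str, str] = {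
--         "sonnet": "ANTHROPIC_DEFAULT_SONNET_MODEL",
--         "opus": "ANTHROPIC_DEFAULT_OPUS_MODEL",
--         "haiku": "ANTHROPIC_DEFAULT_HAIKU_MODEL",
--     }
--     if key in alias_to_env:
--         ev = (env.get(alias_to_env[key]) or "").strip()
--         if ev:
--             return _resolve_claude_picker_model(ev, env, merged) if ev.lower() in alias_to_env else ev
--     # 已是完整 id
--     if "claude-" in m or m.startswith("arn:") or m.startswith("vertex"):
--         return m
--     if key in ("sonnet", "opus", "haiku"):
--         fallbacks: dict[str, str] = {
--             "sonnet": "claude-sonnet-4-5",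
--             "opus": "claude-opus-4-5",
--             "haiku": "claude-haiku-4-5",
--         }
--         return fallbacks.get(key, m)
--     return m
-- ===== SOURCE B (Python) =====
-- def _resolve_claude_picker_model(raw: str, env: dict, merged: dict) -> str:
--     m = (raw or "").strip()
--     if not m:
--         return "claude-sonnet-4-5"
--     key = m.lower()
--     alias_to_env = {
--         "sonnet": "ANTHROPIC_DEFAULT_SONNET_MODEL",
--         "opus": "ANTHROPIC_DEFAULT_OPUS_MODEL",
--         "haiku": "ANTHROPIC_DEFAULT_HAIKU_MODEL",
--     }
--     if key not in alias_to_env: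
--         # non-alias input is returned as-is (full id or free-form string)
--         return m
--     fallbacks = {
--         "sonnet": "claude-sonnet-4-5",
--         "opus": "claude-opus-4-5",
--         "haiku": "claude-haiku-4-5",
--     }
--     # follow the env-override chain among aliases; a visited set breaks cycles
--     seen = set()
--     while key not in seen:
--         seen.add(key)
--         ev = (env.get(alias_to_env[key]) or "").strip()
--         if not ev:
--             return fallbacks[key]
--         low = ev.lower()
--         if low not in alias_to_env:
--             return ev
--         key = low
--     return fallbacks[key]  # cyclic overrides: fall back to the static default
-- ===== Notes on version B (the rewrite author's own statement) =====
-- stated objective: alternative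
-- what changed: Replaces A's self-recursion through re-parsed raw strings by a single iterative alias-chain walk over lowercased alias keys with a visited set (so cyclic ANTHROPIC_DEFAULT_* overrides terminate instead of recursing forever), and collapses A's trailing full-id/fallback checks into direct returns, since for an alias key they always yield the static fallback and for a non-alias key they always return the input unchanged.
import Mathlib
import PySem

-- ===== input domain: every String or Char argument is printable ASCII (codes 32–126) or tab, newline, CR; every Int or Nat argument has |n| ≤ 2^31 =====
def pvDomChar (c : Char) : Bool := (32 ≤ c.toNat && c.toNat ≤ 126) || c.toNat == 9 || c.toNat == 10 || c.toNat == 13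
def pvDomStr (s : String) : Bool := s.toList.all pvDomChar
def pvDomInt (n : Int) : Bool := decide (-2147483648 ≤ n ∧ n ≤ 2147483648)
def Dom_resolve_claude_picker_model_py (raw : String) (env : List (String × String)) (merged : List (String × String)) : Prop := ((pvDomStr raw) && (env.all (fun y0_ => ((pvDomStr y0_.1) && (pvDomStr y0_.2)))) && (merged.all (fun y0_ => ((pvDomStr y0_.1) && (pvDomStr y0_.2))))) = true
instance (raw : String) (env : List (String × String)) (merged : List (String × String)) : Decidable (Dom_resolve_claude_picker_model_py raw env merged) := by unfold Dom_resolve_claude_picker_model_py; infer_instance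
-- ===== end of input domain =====

-- B replaces A's self-recursion by an iterative alias-chain walk with a visited set (cycles fall
-- back to the default instead of raising) and collapses the trailing full-id/fallback checks into
-- direct returns; objective: alternative decomposition, same cost.


-- ===== PORT A =====
-- alias_to_env / fallbacks: A's literal dicts
def pvAliasToEnvA : PySem.Dict String String :=
  PySem.Dict.mk [("sonnet", "ANTHROPIC_DEFAULT_SONNET_MODEL"),
                 ("opus", "ANTHROPIC_DEFAULT_OPUS_MODEL"),
                 ("haiku", "ANTHROPIC_DEFAULT_HAIKU_MODEL")]
def pvFallbacksA : PySem.Dict String String :=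
  PySem.Dict.mk [("sonnet", "claude-sonnet-4-5"),
                 ("opus", "claude-opus-4-5"),
                 ("haiku", "claude-haiku-4-5")]

-- the code A runs after the env-override block (full-id check, tuple check, final `return m`)
def pvTailA (m key : String) : String :=
  if PySem.Str.isIn "claude-" m || PySem.Str.startswith m "arn:" || PySem.Str.startswith m "vertex" then m
  else if key == "sonnet" || key == "opus" || key == "haiku" then PySem.Dict.getD pvFallbacksA key m
  else m

-- A's body; the Nat is a fuel guard making the self-recursion total (under Pre_ the alias chain
-- dies within 3 steps, so fuel 4 is never exhausted)
def pvAgo : Nat → String → List (String × String) → List (String × String) → String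
  | 0, _, _, _ => "claude-sonnet-4-5"
  | f + 1, raw, env, merged =>
    let m := PySem.Str.strip raw
    if m == "" then "claude-sonnet-4-5"
    else
      let key := PySem.Str.lower m
      if PySem.Dict.contains pvAliasToEnvA key then
        let ev := PySem.Str.strip ((PySem.Dict.get? (PySem.Dict.mk env) ((PySem.Dict.get? pvAliasToEnvA key).getD "")).getD "")
        if ev ≠ "" then
          if PySem.Dict.contains pvAliasToEnvA (PySem.Str.lower ev) then pvAgo f ev env merged else ev
        else pvTailA m key
      else pvTailA m key

def resolve_claude_picker_model_py (raw : String) (env : List (String × String)) (merged : List (String × String)) : String :=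
  pvAgo 4 raw env merged

-- ===== PORT B =====
def pvIsAliasB (k : String) : Bool := k == "sonnet" || k == "opus" || k == "haiku"
def pvEnvVarB (k : String) : String :=
  if k == "sonnet" then "ANTHROPIC_DEFAULT_SONNET_MODEL"
  else if k == "opus" then "ANTHROPIC_DEFAULT_OPUS_MODEL"
  else "ANTHROPIC_DEFAULT_HAIKU_MODEL"
def pvFallbackB (k : String) : String :=
  if k == "sonnet" then "claude-sonnet-4-5"
  else if k == "opus" then "claude-opus-4-5"
  else "claude-haiku-4-5"

-- B's while-loop over alias keys; fuel guard only (the visited set over the 3 aliases stops the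
-- loop after at most 3 iterations, so fuel 4 is never exhausted)
def pvBgo : Nat → String → List (String × String) → PySem.Set String → String
  | 0, key, _, _ => pvFallbackB key
  | f + 1, key, env, seen =>
    if PySem.Set.contains seen key then pvFallbackB key
    else
      let ev := PySem.Str.strip ((PySem.Dict.get? (PySem.Dict.mk env) (pvEnvVarB key)).getD "")
      if ev == "" then pvFallbackB key
      else
        let low := PySem.Str.lower ev
        if pvIsAliasB low then pvBgo f low env (PySem.Set.add seen key)
        else ev

def resolve_claude_picker_model_py_alt (raw : String) (env : List (String × String)) (merged : List (String × String)) : String :=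
  let m := PySem.Str.strip raw
  if m == "" then "claude-sonnet-4-5"
  else
    let key := PySem.Str.lower m
    if pvIsAliasB key then pvBgo 4 key env PySem.Set.empty
    else m

-- ===== PRECONDITION & SPEC =====
-- one step of the env-override alias chain: defined exactly when the (stripped) override of an
-- alias key is itself an alias, yielding the next (lowercased) alias key
def pvStep (env : List (String × String)) (k : String) : Option String :=
  if k == "sonnet" || k == "opus" || k == "haiku" then
    let v := if k == "sonnet" then "ANTHROPIC_DEFAULT_SONNET_MODEL"
             else if k == "opus" then "ANTHROPIC_DEFAULT_OPUS_MODEL"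
             else "ANTHROPIC_DEFAULT_HAIKU_MODEL"
    let ev := PySem.Str.strip ((PySem.Dict.get? (PySem.Dict.mk env) v).getD "")
    let low := PySem.Str.lower ev
    if ev ≠ "" ∧ (low == "sonnet" || low == "opus" || low == "haiku") then some low else none
  else none

-- Pre_ excludes exactly the inputs whose ANTHROPIC_DEFAULT_* overrides form a cyclic alias chain
-- (3 distinct aliases, so a live chain of 3 steps must revisit a key): there Python A raises RecursionError.
def Pre_resolve_claude_picker_model_py (raw : String) (env : List (String × String)) (merged : List (String × String)) : Prop :=
  (((pvStep env (PySem.Str.lower (PySem.Str.strip raw))).bind (pvStep env)).bind (pvStep env)) = none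
instance (raw : String) (env : List (String × String)) (merged : List (String × String)) : Decidable (Pre_resolve_claude_picker_model_py raw env merged) := by unfold Pre_resolve_claude_picker_model_py; infer_instance

def pvWitness_resolve_claude_picker_model_py : String × (List (String × String)) × (List (String × String)) :=
  ("Sonnet", [("ANTHROPIC_DEFAULT_SONNET_MODEL", " opus ")], [])

def Spec_resolve_claude_picker_model_py (raw : String) (env : List (String × String)) (merged : List (String × String)) (out : String) : Prop := out = resolve_claude_picker_model_py_alt raw env merged
instance (raw : String) (env : List (String × String)) (merged : List (String × String)) (out : String) : Decidable (Spec_resolve_claude_picker_model_py raw env merged out) := by unfold Spec_resolve_claude_picker_model_py; infer_instance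

-- ===== CLAIM (what is proved, stated in full; the proofs are below) =====
def Claim_equal_resolve_claude_picker_model_py : Prop := ∀ (raw : String) (env : List (String × String)) (merged : List (String × String)), Dom_resolve_claude_picker_model_py raw env merged → Pre_resolve_claude_picker_model_py raw env merged → Spec_resolve_claude_picker_model_py raw env merged (resolve_claude_picker_model_py raw env merged)

-- ===== LEMMAS AND PROOFS =====

lemma aliasCases {k : String} (h : pvIsAliasB k = true) :
    k = "sonnet" ∨ k = "opus" ∨ k = "haiku" := by
  simp [pvIsAliasB] at h; tauto

lemma containsA_eq (k : String) : PySem.Dict.contains pvAliasToEnvA k = pvIsAliasB k := by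
  simp [PySem.Dict.contains, pvAliasToEnvA, pvIsAliasB, List.any, BEq.comm, Bool.or_assoc]

lemma varA_eq {k : String} (h : pvIsAliasB k = true) :
    (PySem.Dict.get? pvAliasToEnvA k).getD "" = pvEnvVarB k := by
  rcases aliasCases h with h | h | h <;> subst h <;> rfl

lemma fallbackA_eq {k : String} (m : String) (h : pvIsAliasB k = true) :
    PySem.Dict.getD pvFallbacksA k m = pvFallbackB k := by
  rcases aliasCases h with h | h | h <;> subst h <;> rfl

lemma pfx_dropWhile_eq_self (p : Char → Bool) {v w : List Char} (hv : List.dropWhile p v = v)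
    (hw : w <+: v) : List.dropWhile p w = w := by
  rw [List.dropWhile_eq_self_iff] at *
  intro hl
  obtain ⟨t, rfl⟩ := hw
  cases w with
  | nil => simp at hl
  | cons a w' => simpa using hv (by simp)

lemma rstrip_prefix (l : List Char) : PySem.Chars.rstrip l <+: l := by
  simpa [PySem.Chars.rstrip] using (List.reverse_prefix.mpr (by simpa using List.dropWhile_suffix (l := l.reverse) PySem.Chars.isspace)).trans (by simp)

lemma chars_strip_strip (l : List Char) :
    PySem.Chars.strip (PySem.Chars.strip l) = PySem.Chars.strip l := by
  simp only [PySem.Chars.strip]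
  rw [show PySem.Chars.lstrip (PySem.Chars.rstrip (PySem.Chars.lstrip l)) =
        PySem.Chars.rstrip (PySem.Chars.lstrip l) from
    pfx_dropWhile_eq_self _ (by simp [PySem.Chars.lstrip, List.dropWhile_idempotent])
      (rstrip_prefix _)]
  simp [PySem.Chars.rstrip, List.dropWhile_idempotent]

lemma strip_strip (s : String) : PySem.Str.strip (PySem.Str.strip s) = PySem.Str.strip s := by
  simp [PySem.Str.strip, chars_strip_strip]

lemma tail_nonalias {m k : String} (h : pvIsAliasB k = false) : pvTailA m k = m := by
  have h' : (k == "sonnet" || k == "opus" || k == "haiku") = false := h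
  simp only [pvTailA, h']
  split <;> rfl

lemma lower_map {m w : String} (hc : PySem.Str.lower m = w) :
    m.toList.map PySem.Chars.lowerChar = w.toList := by
  simpa [PySem.Str.lower, PySem.Chars.lower] using congrArg String.toList hc

lemma no_claude {m : String} (hlen : m.length ≤ 6) :
    PySem.Str.isIn "claude-" m = false := by
  by_cases hin : PySem.Str.isIn "claude-" m = true
  · have h2 := ((PySem.Str.isIn_iff_infix _ _).mp hin).length_le
    simp at h2
    omega
  · simpa using hin

lemma no_pref {m p w : String} (hmap : m.toList.map PySem.Chars.lowerChar = w.toList)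
    (hfalse : ∀ t : List Char, List.map PySem.Chars.lowerChar (p.toList ++ t) = w.toList → False) :
    PySem.Str.startswith m p = false := by
  by_cases hs : PySem.Str.startswith m p = true
  · rw [PySem.Str.startswith_eq] at hs
    obtain ⟨t, ht⟩ := (PySem.Chars.startswith_iff _ _).mp hs
    rw [← ht] at hmap
    exact (hfalse t hmap).elim
  · simpa using hs

lemma tail_alias {m : String} (h : pvIsAliasB (PySem.Str.lower m) = true) :
    pvTailA m (PySem.Str.lower m) = pvFallbackB (PySem.Str.lower m) := by
  have h1 : PySem.Str.isIn "claude-" m = false := by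
    rcases aliasCases h with hc | hc | hc <;>
      exact no_claude (le_of_eq (by simpa using congrArg List.length (lower_map hc)) |>.trans (by norm_num))
  have h2 : PySem.Str.startswith m "arn:" = false := by
    rcases aliasCases h with hc | hc | hc <;>
      exact no_pref (lower_map hc)
        (fun t ht => by simp [PySem.Chars.lowerChar, PySem.Chars.isupper] at ht)
  have h3 : PySem.Str.startswith m "vertex" = false := by
    rcases aliasCases h with hc | hc | hc <;>
      exact no_pref (lower_map hc)
        (fun t ht => by simp [PySem.Chars.lowerChar, PySem.Chars.isupper] at ht)
  have h' : (PySem.Str.lower m == "sonnet" || PySem.Str.lower m == "opus" ||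
      PySem.Str.lower m == "haiku") = true := h
  simp only [pvTailA, h1, h2, h3, h', Bool.or_false, Bool.false_or, Bool.or_self,
    if_false, if_true, Bool.false_eq_true, ite_false, ite_true]
  exact fallbackA_eq m h

lemma levelA (f : Nat) (raw : String) (env merged : List (String × String))
    (hne : PySem.Str.strip raw ≠ "")
    (hal : pvIsAliasB (PySem.Str.lower (PySem.Str.strip raw)) = true) :
    pvAgo (f + 1) raw env merged =
      (if PySem.Str.strip ((PySem.Dict.get? (PySem.Dict.mk env) (pvEnvVarB (PySem.Str.lower (PySem.Str.strip raw)))).getD "") ≠ "" then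
        (if pvIsAliasB (PySem.Str.lower (PySem.Str.strip ((PySem.Dict.get? (PySem.Dict.mk env) (pvEnvVarB (PySem.Str.lower (PySem.Str.strip raw)))).getD ""))) then
          pvAgo f (PySem.Str.strip ((PySem.Dict.get? (PySem.Dict.mk env) (pvEnvVarB (PySem.Str.lower (PySem.Str.strip raw)))).getD "")) env merged
         else PySem.Str.strip ((PySem.Dict.get? (PySem.Dict.mk env) (pvEnvVarB (PySem.Str.lower (PySem.Str.strip raw)))).getD ""))
       else pvFallbackB (PySem.Str.lower (PySem.Str.strip raw))) := by
  have hb : (PySem.Str.strip raw == "") = false := by simpa using hne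
  rw [pvAgo]
  simp [hb, containsA_eq, hal, varA_eq hal, tail_alias hal]

lemma levelB (g : Nat) (key : String) (env : List (String × String)) (seen : PySem.Set String)
    (hseen : PySem.Set.contains seen key = false) :
    pvBgo (g + 1) key env seen =
      (if PySem.Str.strip ((PySem.Dict.get? (PySem.Dict.mk env) (pvEnvVarB key)).getD "") = "" then
        pvFallbackB key
       else if pvIsAliasB (PySem.Str.lower (PySem.Str.strip ((PySem.Dict.get? (PySem.Dict.mk env) (pvEnvVarB key)).getD ""))) then
        pvBgo g (PySem.Str.lower (PySem.Str.strip ((PySem.Dict.get? (PySem.Dict.mk env) (pvEnvVarB key)).getD ""))) env (PySem.Set.add seen key)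
       else PySem.Str.strip ((PySem.Dict.get? (PySem.Dict.mk env) (pvEnvVarB key)).getD "")) := by
  have h' : ¬ key ∈ seen := by simpa [PySem.Set.contains] using hseen
  rw [pvBgo]
  simp [h']

lemma pvStep_eq (env : List (String × String)) (key : String) (hal : pvIsAliasB key = true) :
    pvStep env key =
      (if PySem.Str.strip ((PySem.Dict.get? (PySem.Dict.mk env) (pvEnvVarB key)).getD "") ≠ "" ∧
          pvIsAliasB (PySem.Str.lower (PySem.Str.strip ((PySem.Dict.get? (PySem.Dict.mk env) (pvEnvVarB key)).getD ""))) then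
        some (PySem.Str.lower (PySem.Str.strip ((PySem.Dict.get? (PySem.Dict.mk env) (pvEnvVarB key)).getD "")))
       else none) := by
  have h' : (key == "sonnet" || key == "opus" || key == "haiku") = true := hal
  simp only [pvStep, pvEnvVarB, pvIsAliasB, h', if_true]


lemma deadEq (f g : Nat) (raw : String) (env merged : List (String × String))
    (seen : PySem.Set String)
    (hne : PySem.Str.strip raw ≠ "")
    (hal : pvIsAliasB (PySem.Str.lower (PySem.Str.strip raw)) = true)
    (hseen : PySem.Set.contains seen (PySem.Str.lower (PySem.Str.strip raw)) = false)
    (hstep : pvStep env (PySem.Str.lower (PySem.Str.strip raw)) = none) :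
    pvAgo (f + 1) raw env merged = pvBgo (g + 1) (PySem.Str.lower (PySem.Str.strip raw)) env seen := by
  rw [levelA f raw env merged hne hal, levelB g _ env seen hseen]
  rw [pvStep_eq env _ hal] at hstep
  by_cases he : PySem.Str.strip ((PySem.Dict.get? (PySem.Dict.mk env) (pvEnvVarB (PySem.Str.lower (PySem.Str.strip raw)))).getD "") = ""
  · simp [he]
  · have hf : pvIsAliasB (PySem.Str.lower (PySem.Str.strip ((PySem.Dict.get? (PySem.Dict.mk env) (pvEnvVarB (PySem.Str.lower (PySem.Str.strip raw)))).getD ""))) = false := by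
      by_contra hcon
      rw [if_pos ⟨he, by simpa using hcon⟩] at hstep
      simp at hstep
    simp [he, hf]

lemma recA (f : Nat) (raw : String) (env merged : List (String × String)) (k1 : String)
    (hne : PySem.Str.strip raw ≠ "")
    (hal : pvIsAliasB (PySem.Str.lower (PySem.Str.strip raw)) = true)
    (hstep : pvStep env (PySem.Str.lower (PySem.Str.strip raw)) = some k1) :
    pvAgo (f + 1) raw env merged =
      pvAgo f (PySem.Str.strip ((PySem.Dict.get? (PySem.Dict.mk env) (pvEnvVarB (PySem.Str.lower (PySem.Str.strip raw)))).getD "")) env merged ∧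
    PySem.Str.strip ((PySem.Dict.get? (PySem.Dict.mk env) (pvEnvVarB (PySem.Str.lower (PySem.Str.strip raw)))).getD "") ≠ "" ∧
    PySem.Str.lower (PySem.Str.strip ((PySem.Dict.get? (PySem.Dict.mk env) (pvEnvVarB (PySem.Str.lower (PySem.Str.strip raw)))).getD "")) = k1 ∧
    pvIsAliasB k1 = true := by
  rw [pvStep_eq env _ hal] at hstep
  have hc : PySem.Str.strip ((PySem.Dict.get? (PySem.Dict.mk env) (pvEnvVarB (PySem.Str.lower (PySem.Str.strip raw)))).getD "") ≠ "" ∧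
      pvIsAliasB (PySem.Str.lower (PySem.Str.strip ((PySem.Dict.get? (PySem.Dict.mk env) (pvEnvVarB (PySem.Str.lower (PySem.Str.strip raw)))).getD ""))) = true := by
    by_contra hcon
    rw [if_neg (by simpa using hcon)] at hstep
    simp at hstep
  have hk : PySem.Str.lower (PySem.Str.strip ((PySem.Dict.get? (PySem.Dict.mk env) (pvEnvVarB (PySem.Str.lower (PySem.Str.strip raw)))).getD "")) = k1 := by
    rw [if_pos (by simpa using hc)] at hstep
    exact Option.some.inj hstep
  refine ⟨?_, hc.1, hk, hk ▸ hc.2⟩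
  rw [levelA f raw env merged hne hal]
  simp [hc.1, hc.2]

lemma recB (g : Nat) (key k1 : String) (env : List (String × String)) (seen : PySem.Set String)
    (hal : pvIsAliasB key = true)
    (hseen : PySem.Set.contains seen key = false)
    (hstep : pvStep env key = some k1) :
    pvBgo (g + 1) key env seen = pvBgo g k1 env (PySem.Set.add seen key) := by
  rw [pvStep_eq env _ hal] at hstep
  have hc : PySem.Str.strip ((PySem.Dict.get? (PySem.Dict.mk env) (pvEnvVarB key)).getD "") ≠ "" ∧
      pvIsAliasB (PySem.Str.lower (PySem.Str.strip ((PySem.Dict.get? (PySem.Dict.mk env) (pvEnvVarB key)).getD ""))) = true := by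
    by_contra hcon
    rw [if_neg (by simpa using hcon)] at hstep
    simp at hstep
  have hk : PySem.Str.lower (PySem.Str.strip ((PySem.Dict.get? (PySem.Dict.mk env) (pvEnvVarB key)).getD "")) = k1 := by
    rw [if_pos (by simpa using hc)] at hstep
    exact Option.some.inj hstep
  rw [levelB g key env seen hseen]
  rw [if_neg (by simpa using hc.1), if_pos (by simpa using hc.2), hk]

theorem resolve_claude_picker_model_py_spec : Claim_equal_resolve_claude_picker_model_py := by
  intro raw env merged _hdom hpre
  unfold Pre_resolve_claude_picker_model_py at hpre
  unfold Spec_resolve_claude_picker_model_py resolve_claude_picker_model_py resolve_claude_picker_model_py_alt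
  by_cases h0 : PySem.Str.strip raw = ""
  · rw [pvAgo]
    simp [h0]
  · have hb : (PySem.Str.strip raw == "") = false := by simpa using h0
    by_cases hal : pvIsAliasB (PySem.Str.lower (PySem.Str.strip raw)) = true
    · simp only [hb, Bool.false_eq_true, if_false, hal, if_true]
      cases hstep0 : pvStep env (PySem.Str.lower (PySem.Str.strip raw)) with
      | none =>
        exact deadEq 3 3 raw env merged PySem.Set.empty h0 hal (by simp [PySem.Set.contains, PySem.Set.empty]) hstep0
      | some k1 =>
        obtain ⟨hA0, hne1, hlow1, hal1⟩ := recA 3 raw env merged k1 h0 hal hstep0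
        rw [hA0, recB 3 _ k1 env PySem.Set.empty hal (by simp [PySem.Set.contains, PySem.Set.empty]) hstep0]
        have hpre1 : (pvStep env k1).bind (pvStep env) = none := by
          rw [hstep0] at hpre; simpa using hpre
        have hne10 : k1 ≠ PySem.Str.lower (PySem.Str.strip raw) := by
          intro h
          rw [h, hstep0] at hpre1
          simp at hpre1
          rw [h, hstep0] at hpre1
          simp at hpre1
        have hsE0 : PySem.Str.strip (PySem.Str.strip ((PySem.Dict.get? (PySem.Dict.mk env) (pvEnvVarB (PySem.Str.lower (PySem.Str.strip raw)))).getD "")) = PySem.Str.strip ((PySem.Dict.get? (PySem.Dict.mk env) (pvEnvVarB (PySem.Str.lower (PySem.Str.strip raw)))).getD "") := strip_strip _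
        have hneE0 : PySem.Str.strip (PySem.Str.strip ((PySem.Dict.get? (PySem.Dict.mk env) (pvEnvVarB (PySem.Str.lower (PySem.Str.strip raw)))).getD "")) ≠ "" := by rw [hsE0]; exact hne1
        have halE0 : pvIsAliasB (PySem.Str.lower (PySem.Str.strip (PySem.Str.strip ((PySem.Dict.get? (PySem.Dict.mk env) (pvEnvVarB (PySem.Str.lower (PySem.Str.strip raw)))).getD "")))) = true := by
          rw [hsE0, hlow1]; exact hal1
        have hseen1 : PySem.Set.contains (PySem.Set.add PySem.Set.empty (PySem.Str.lower (PySem.Str.strip raw))) k1 = false := by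
          simp [PySem.Set.contains, PySem.Set.add, PySem.Set.empty, hne10, Ne.symm hne10]
        cases hstep1 : pvStep env k1 with
        | none =>
          have hd := deadEq 2 2 _ env merged (PySem.Set.add PySem.Set.empty (PySem.Str.lower (PySem.Str.strip raw))) hneE0 halE0 (by rw [hsE0, hlow1]; exact hseen1) (by rw [hsE0, hlow1]; exact hstep1)
          rw [hsE0, hlow1] at hd
          exact hd
        | some k2 =>
          have hpre2 : pvStep env k2 = none := by
            rw [hstep1] at hpre1; simpa using hpre1
          have hne21 : k2 ≠ k1 := by
            intro h; rw [h, hstep1] at hpre2; simp at hpre2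
          have hne20 : k2 ≠ PySem.Str.lower (PySem.Str.strip raw) := by
            intro h; rw [h, hstep0] at hpre2; simp at hpre2
          obtain ⟨hA1, hne2, hlow2, hal2⟩ := recA 2 _ env merged k2 hneE0 halE0 (by rw [hsE0, hlow1]; exact hstep1)
          rw [hsE0, hlow1] at hA1 hne2 hlow2
          rw [hA1, recB 2 k1 k2 env _ hal1 hseen1 hstep1]
          have hseen2 : PySem.Set.contains (PySem.Set.add (PySem.Set.add PySem.Set.empty (PySem.Str.lower (PySem.Str.strip raw))) k1) k2 = false := by
            simp [PySem.Set.contains, PySem.Set.add, PySem.Set.empty, hne10, Ne.symm hne10, hne21, hne20, Ne.symm hne21, Ne.symm hne20]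
          have hsE1 : PySem.Str.strip (PySem.Str.strip ((PySem.Dict.get? (PySem.Dict.mk env) (pvEnvVarB k1)).getD "")) = PySem.Str.strip ((PySem.Dict.get? (PySem.Dict.mk env) (pvEnvVarB k1)).getD "") := strip_strip _
          have hd := deadEq 1 1 (PySem.Str.strip ((PySem.Dict.get? (PySem.Dict.mk env) (pvEnvVarB k1)).getD "")) env merged (PySem.Set.add (PySem.Set.add PySem.Set.empty (PySem.Str.lower (PySem.Str.strip raw))) k1) (by rw [hsE1]; exact hne2) (by rw [hsE1, hlow2]; exact hal2) (by rw [hsE1, hlow2]; exact hseen2) (by rw [hsE1, hlow2]; exact hpre2)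
          rw [hsE1, hlow2] at hd
          exact hd
    · have hf : pvIsAliasB (PySem.Str.lower (PySem.Str.strip raw)) = false := by simpa using hal
      rw [pvAgo]
      simp [hb, containsA_eq, hf, tail_nonalias hf]
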